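-- pv_equiv track=rewrite | github.com/dropfred/AoC | aoc-2025-python/day_09.py | part_2
-- ===== SOURCE A (Python) =====
-- from itertools import combinations, chain, pairwise
--
-- def size(a, b):
--     ax, ay = a
--     bx, by = b
--     dx, dy = abs(bx - ax) + 1, abs(by - ay) + 1
--     return (dx * dy)
--
-- def part_2(puzzle):
--     def valid(a, b):
--         xa, ya = a
--         xb, yb = b
--         if xa > xb: xa, xb = xb, xa
--         if ya > yb: ya, yb = yb, ya
--         def valid(i, j):
--             xi, yi = i
--             xj, yj = j
--             if xi > xj: xi, xj = xj, xi
--             if yi > yj: yi, yj = yj, yi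
--             return xj <= xa or xi >= xb or yj <= ya or yi >= yb
--         for i, j in pairwise(chain(puzzle, puzzle[:1])):
--             if not valid(i, j): return False
--         return True
--
--     area = 0
--     for a, b in combinations(puzzle, 2):
--         if (s := size(a, b)) > area and valid(a, b):
--             area = s
--     return area
-- ===== SOURCE B (Python) =====
-- def part_2(puzzle):
--     n = len(puzzle)
--     edges = []
--     for k in range(n):
--         (xi, yi) = puzzle[k]
--         (xj, yj) = puzzle[(k + 1) % n]
--         edges.append((min(xi, xj), max(xi, xj), min(yi, yj), max(yi, yj)))
--
--     def ok(a, b):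
--         lox, hix = min(a[0], b[0]), max(a[0], b[0])
--         loy, hiy = min(a[1], b[1]), max(a[1], b[1])
--         for (x1, x2, y1, y2) in edges:
--             if x2 > lox and x1 < hix and y2 > loy and y1 < hiy:
--                 return False
--         return True
--
--     pairs = []
--     for i in range(n):
--         for j in range(i + 1, n):
--             pairs.append((puzzle[i], puzzle[j]))
--     pairs.sort(key=lambda p: (abs(p[1][0] - p[0][0]) + 1) * (abs(p[1][1] - p[0][1]) + 1),
--                reverse=True)
--     for a, b in pairs:
--         if ok(a, b):
--             return (abs(b[0] - a[0]) + 1) * (abs(b[1] - a[1]) + 1)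
--     return 0
-- ===== Notes on version B (the rewrite author's own statement) =====
-- stated objective: alternative
-- what changed: Replaces A's running-max scan (with size>area pruning) by a staged pipeline: precompute a normalized (minx,maxx,miny,maxy) edge table once via modular indexing, build all vertex pairs with index loops, sort them by rectangle size descending, and return the size of the first valid pair (0 if none).
import Mathlib
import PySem

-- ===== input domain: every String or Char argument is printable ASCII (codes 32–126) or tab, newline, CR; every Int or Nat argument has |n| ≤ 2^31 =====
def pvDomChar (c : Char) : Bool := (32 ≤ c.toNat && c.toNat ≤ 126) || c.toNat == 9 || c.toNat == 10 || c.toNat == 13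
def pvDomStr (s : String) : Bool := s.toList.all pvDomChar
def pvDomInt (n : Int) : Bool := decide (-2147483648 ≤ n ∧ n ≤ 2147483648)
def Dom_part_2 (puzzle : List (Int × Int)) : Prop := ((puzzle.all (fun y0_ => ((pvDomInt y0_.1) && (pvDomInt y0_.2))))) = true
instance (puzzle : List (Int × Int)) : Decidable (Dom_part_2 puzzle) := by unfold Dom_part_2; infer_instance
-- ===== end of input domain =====

-- B replaces A's accumulate-the-best scan (running max with a size>area pruning) by:
-- normalize all polygon edges once into (minx,maxx,miny,maxy) tuples via modular
-- indexing, generate the vertex pairs by index loops, sort them by rectangle size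
-- descending, and return the size of the first valid pair (0 if none).
-- Objective: alternative (not claimed faster).

-- ===== PORT A =====
def size (a b : Int × Int) : Int :=
  (|b.1 - a.1| + 1) * (|b.2 - a.2| + 1)

-- itertools.pairwise(chain(puzzle, puzzle[:1])): consecutive vertex pairs, wrapping once.
def edgesA (l : List (Int × Int)) : List ((Int × Int) × (Int × Int)) :=
  l.zip (l.drop 1 ++ l.take 1)

-- the nested `valid(a, b)` closure (its `for … return False / return True` loop is `all`)
def pvalid (puzzle : List (Int × Int)) (a b : Int × Int) : Bool :=
  let xa := if a.1 > b.1 then b.1 else a.1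
  let xb := if a.1 > b.1 then a.1 else b.1
  let ya := if a.2 > b.2 then b.2 else a.2
  let yb := if a.2 > b.2 then a.2 else b.2
  (edgesA puzzle).all (fun ij =>
    let i := ij.1; let j := ij.2
    let xi := if i.1 > j.1 then j.1 else i.1
    let xj := if i.1 > j.1 then i.1 else j.1
    let yi := if i.2 > j.2 then j.2 else i.2
    let yj := if i.2 > j.2 then i.2 else j.2
    decide (xj ≤ xa) || decide (xi ≥ xb) || decide (yj ≤ ya) || decide (yi ≥ yb))

-- itertools.combinations(l, 2) as pairs, in CPython order (hand port, exact)
def combos2 : List (Int × Int) → List ((Int × Int) × (Int × Int))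
  | [] => []
  | x :: xs => xs.map (fun y => (x, y)) ++ combos2 xs

def part_2 (puzzle : List (Int × Int)) : Int :=
  (combos2 puzzle).foldl
    (fun area p => if size p.1 p.2 > area && pvalid puzzle p.1 p.2 then size p.1 p.2 else area)
    0

-- ===== PORT B =====
-- the `edges` table: for k in range(n), normalized bounding box of edge (p[k], p[(k+1) % n]);
-- indices here are Nat and nonnegative, so Lean's Nat % and getD k-in-range match Python exactly
def rectEdges (l : List (Int × Int)) : List (Int × Int × Int × Int) :=
  (List.range l.length).map (fun k =>
    let p := l.getD k (0, 0)
    let q := l.getD ((k + 1) % l.length) (0, 0)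
    (min p.1 q.1, max p.1 q.1, min p.2 q.2, max p.2 q.2))

-- the `ok(a, b)` check against the precomputed table (early `return False` loop is `any`)
def okRect (es : List (Int × Int × Int × Int)) (a b : Int × Int) : Bool :=
  let lox := min a.1 b.1
  let hix := max a.1 b.1
  let loy := min a.2 b.2
  let hiy := max a.2 b.2
  !(es.any (fun e =>
      decide (e.2.1 > lox) && decide (e.1 < hix) && decide (e.2.2.2 > loy) && decide (e.2.2.1 < hiy)))

-- the two index loops building `pairs`
def idxPairs (l : List (Int × Int)) : List ((Int × Int) × (Int × Int)) :=
  (List.range l.length).flatMap (fun i =>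
    ((List.range l.length).drop (i + 1)).map (fun j => (l.getD i (0, 0), l.getD j (0, 0))))

def part_2_alt (puzzle : List (Int × Int)) : Int :=
  let es := rectEdges puzzle
  let pairs := PySem.List.sorted (idxPairs puzzle)
      (fun p => (|p.2.1 - p.1.1| + 1) * (|p.2.2 - p.1.2| + 1)) true
  match pairs.find? (fun p => okRect es p.1 p.2) with
  | some p => (|p.2.1 - p.1.1| + 1) * (|p.2.2 - p.1.2| + 1)
  | none => 0

-- ===== PRECONDITION & SPEC =====
def Spec_part_2 (puzzle : List (Int × Int)) (out : Int) : Prop := out = part_2_alt puzzle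
instance (puzzle : List (Int × Int)) (out : Int) : Decidable (Spec_part_2 puzzle out) := by unfold Spec_part_2; infer_instance

-- ===== CLAIM (what is proved, stated in full; the proofs are below) =====
def Claim_equal_part_2 : Prop := ∀ (puzzle : List (Int × Int)), Dom_part_2 puzzle → Spec_part_2 puzzle (part_2 puzzle)

-- ===== LEMMAS AND PROOFS =====

theorem size_pos (a b : Int × Int) : 1 ≤ size a b := by
  unfold size
  have h1 : (0:Int) ≤ |b.1 - a.1| := abs_nonneg _
  have h2 : (0:Int) ≤ |b.2 - a.2| := abs_nonneg _
  nlinarith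

-- A's fold step is "max with the key if valid"
theorem foldA_eq_foldMax (v : (Int × Int) × (Int × Int) → Bool)
    (key : (Int × Int) × (Int × Int) → Int)
    (L : List ((Int × Int) × (Int × Int))) (a : Int) :
    L.foldl (fun area p => if key p > area && v p then key p else area) a
      = List.foldl max a ((L.filter v).map key) := by
  induction L generalizing a with
  | nil => rfl
  | cons p T ih =>
    simp only [List.foldl_cons]
    by_cases hv : v p
    · rw [List.filter_cons_of_pos hv, List.map_cons, List.foldl_cons]
      have hstep : (if key p > a && v p then key p else a) = max a (key p) := by
        by_cases hk : key p > a
        · simp [hv, hk, max_eq_right hk.le]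
        · simp only [hv, Bool.and_true, hk, decide_false]
          rw [if_neg (by simp), max_eq_left (by omega)]
      rw [hstep, ih]
    · rw [List.filter_cons_of_neg hv]
      have hstep : (if key p > a && v p then key p else a) = a := by simp [hv]
      rw [hstep, ih]

theorem foldl_max_of_le (a : Int) (l : List Int) (h : ∀ x ∈ l, x ≤ a) :
    List.foldl max a l = a := by
  induction l with
  | nil => rfl
  | cons x t ih =>
    simp only [List.foldl_cons]
    rw [max_eq_left (h x (by simp))]
    exact ih (fun y hy => h y (by simp [hy]))

theorem foldl_max_perm {l1 l2 : List Int} (h : l1.Perm l2) (a : Int) :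
    List.foldl max a l1 = List.foldl max a l2 := by
  induction h generalizing a with
  | nil => rfl
  | cons x _ ih => simp only [List.foldl_cons]; exact ih _
  | swap x y l => simp only [List.foldl_cons]; rw [max_right_comm]
  | trans _ _ ih1 ih2 => exact (ih1 a).trans (ih2 a)

-- first valid of a size-descending list is the max of the valid sizes
theorem find?_desc_eq_foldMax (v : (Int × Int) × (Int × Int) → Bool)
    (key : (Int × Int) × (Int × Int) → Int)
    (S : List ((Int × Int) × (Int × Int)))
    (hdesc : S.Pairwise (fun p q => key q ≤ key p))
    (hpos : ∀ p ∈ S, 1 ≤ key p) :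
    (match S.find? v with
     | some p => key p
     | none => 0)
      = List.foldl max 0 ((S.filter v).map key) := by
  induction S with
  | nil => rfl
  | cons p T ih =>
    rcases List.pairwise_cons.mp hdesc with ⟨hhd, htl⟩
    by_cases hv : v p
    · rw [List.find?_cons_of_pos hv, List.filter_cons_of_pos hv, List.map_cons,
        List.foldl_cons]
      show key p = _
      rw [max_eq_right (le_trans (by norm_num) (hpos p (by simp)))]
      refine (foldl_max_of_le _ _ ?_).symm
      intro x hx
      rcases List.mem_map.mp hx with ⟨q, hq, rfl⟩
      exact hhd q (List.mem_of_mem_filter hq)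
    · rw [List.find?_cons_of_neg hv, List.filter_cons_of_neg hv]
      exact ih htl (fun q hq => hpos q (by simp [hq]))

-- (range xs.length).map (g ∘ getD) enumerates xs
theorem map_range_getD {α β : Type} (d : α) (xs : List α) (g : α → β) :
    (List.range xs.length).map (fun j => g (xs.getD j d)) = xs.map g := by
  induction xs with
  | nil => rfl
  | cons x t ih =>
    simp only [List.length_cons, List.range_succ_eq_map, List.map_cons, List.map_map]
    refine congrArg (g x :: ·) ?_
    simpa using ih

-- B's index loops generate exactly itertools.combinations(l, 2)
theorem idxPairs_eq_combos2 (l : List (Int × Int)) : idxPairs l = combos2 l := by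
  induction l with
  | nil => rfl
  | cons x t ih =>
    unfold idxPairs combos2
    rw [List.length_cons, List.range_succ_eq_map, List.flatMap_cons]
    refine congrArg₂ (· ++ ·) ?_ ?_
    · -- i = 0 segment: pairs (x, t[j])
      rw [List.drop_one, List.tail_cons, List.map_map]
      have := map_range_getD ((0,0) : Int × Int) t (fun y => (x, y))
      simpa using this
    · -- shifted segments are idxPairs t
      rw [List.flatMap_map, ← ih]
      unfold idxPairs
      refine List.flatMap_congr ?_
      intro i _
      show (((0 : Nat) :: (List.range t.length).map Nat.succ).drop (i.succ + 1)).map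
          (fun j => ((x :: t).getD i.succ (0, 0), (x :: t).getD j (0, 0))) = _
      rw [show i.succ + 1 = i + 1 + 1 from rfl, List.drop_succ_cons, ← List.map_drop,
        List.map_map]
      refine List.map_congr_left ?_
      intro j _
      rfl

-- (l.drop 1 ++ l.take 1)[k] is l[(k+1) % len(l)]
theorem wrap_get (l : List (Int × Int)) (k : Nat) (hk : k < l.length)
    (h2 : k < (l.drop 1 ++ l.take 1).length) :
    (l.drop 1 ++ l.take 1)[k] = l.getD ((k + 1) % l.length) (0, 0) := by
  by_cases hlast : k + 1 < l.length
  · rw [List.getElem_append_left (by simp; omega)]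
    rw [List.getElem_drop]
    rw [List.getD_eq_getElem l (0,0) (by rw [Nat.mod_eq_of_lt hlast]; omega)]
    congr 1
    rw [Nat.mod_eq_of_lt hlast]
    omega
  · have hk1 : k + 1 = l.length := by omega
    rw [List.getElem_append_right (by simp; omega)]
    rw [List.getElem_take]
    rw [List.getD_eq_getElem l (0,0) (by rw [hk1, Nat.mod_self]; omega)]
    congr 1
    rw [hk1, Nat.mod_self]
    simp
    omega

-- B's normalized edge table comes from A's edge list
theorem rectEdges_eq (l : List (Int × Int)) :
    rectEdges l = (edgesA l).map (fun ij =>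
      (min ij.1.1 ij.2.1, max ij.1.1 ij.2.1, min ij.1.2 ij.2.2, max ij.1.2 ij.2.2)) := by
  apply List.ext_getElem
  · simp [rectEdges, edgesA]; omega
  · intro k h1 h2
    have hk : k < l.length := by simpa [rectEdges] using h1
    simp only [rectEdges, List.getElem_map, List.getElem_range, edgesA, List.getElem_zip]
    rw [wrap_get l k hk (by simp; omega), List.getD_eq_getElem l (0,0) hk]

theorem all_eq_not_any {α : Type} (l : List α) (p q : α → Bool)
    (h : ∀ x ∈ l, p x = !q x) : l.all p = !(l.any q) := by
  induction l with
  | nil => rfl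
  | cons x t ih =>
    simp only [List.all_cons, List.any_cons, Bool.not_or]
    rw [h x (by simp), ih (fun y hy => h y (by simp [hy]))]

-- B's ok check equals A's nested valid closure
theorem okRect_eq_pvalid (puzzle : List (Int × Int)) (a b : Int × Int) :
    okRect (rectEdges puzzle) a b = pvalid puzzle a b := by
  rw [rectEdges_eq]
  unfold okRect pvalid
  dsimp only
  rw [List.any_map]
  refine (all_eq_not_any _ _ _ ?_).symm
  intro ij _
  simp only [Function.comp]
  have e1 : (if a.1 > b.1 then b.1 else a.1) = min a.1 b.1 := by rw [min_def]; split_ifs <;> omega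
  have e2 : (if a.1 > b.1 then a.1 else b.1) = max a.1 b.1 := by rw [max_def]; split_ifs <;> omega
  have e3 : (if a.2 > b.2 then b.2 else a.2) = min a.2 b.2 := by rw [min_def]; split_ifs <;> omega
  have e4 : (if a.2 > b.2 then a.2 else b.2) = max a.2 b.2 := by rw [max_def]; split_ifs <;> omega
  have f1 : (if ij.1.1 > ij.2.1 then ij.2.1 else ij.1.1) = min ij.1.1 ij.2.1 := by
    rw [min_def]; split_ifs <;> omega
  have f2 : (if ij.1.1 > ij.2.1 then ij.1.1 else ij.2.1) = max ij.1.1 ij.2.1 := by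
    rw [max_def]; split_ifs <;> omega
  have f3 : (if ij.1.2 > ij.2.2 then ij.2.2 else ij.1.2) = min ij.1.2 ij.2.2 := by
    rw [min_def]; split_ifs <;> omega
  have f4 : (if ij.1.2 > ij.2.2 then ij.1.2 else ij.2.2) = max ij.1.2 ij.2.2 := by
    rw [max_def]; split_ifs <;> omega
  simp only [e1, e2, e3, e4, f1, f2, f3, f4, Bool.not_and, ← decide_not, not_lt]

theorem part_2_eq_max (puzzle : List (Int × Int)) :
    part_2 puzzle
      = List.foldl max 0 ((((combos2 puzzle).filter
          (fun p => pvalid puzzle p.1 p.2)).map (fun p => size p.1 p.2))) := by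
  unfold part_2
  exact foldA_eq_foldMax _ _ _ 0

theorem part_2_alt_eq_max (puzzle : List (Int × Int)) :
    part_2_alt puzzle
      = List.foldl max 0 ((((combos2 puzzle).filter
          (fun p => pvalid puzzle p.1 p.2)).map (fun p => size p.1 p.2))) := by
  unfold part_2_alt
  have hkey : (fun p : (Int × Int) × (Int × Int) =>
      (|p.2.1 - p.1.1| + 1) * (|p.2.2 - p.1.2| + 1)) = (fun p => size p.1 p.2) := rfl
  have hok : (fun p : (Int × Int) × (Int × Int) => okRect (rectEdges puzzle) p.1 p.2)
      = (fun p => pvalid puzzle p.1 p.2) := by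
    funext p; exact okRect_eq_pvalid puzzle p.1 p.2
  simp only [hkey, hok, idxPairs_eq_combos2]
  have hperm : (PySem.List.sorted (combos2 puzzle) (fun p => size p.1 p.2) true).Perm
      (combos2 puzzle) := PySem.List.sorted_perm _ _ _
  have h1 := find?_desc_eq_foldMax (fun p => pvalid puzzle p.1 p.2)
    (fun p => size p.1 p.2) (PySem.List.sorted (combos2 puzzle) (fun p => size p.1 p.2) true)
    (PySem.List.sorted_pairwise_rev _ _)
    (fun p _ => size_pos p.1 p.2)
  refine h1.trans ?_
  exact foldl_max_perm (((hperm.filter _).map _)) 0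

-- ===== VERDICT (by name: the statement is the Claim_ definition above) =====
theorem part_2_spec : Claim_equal_part_2 := by
  intro puzzle _
  unfold Spec_part_2
  rw [part_2_eq_max, part_2_alt_eq_max]
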